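-- pv_equiv track=rewrite | github.com/iitmsudhakar/Practice_Program_Python | Week_6/PPA_10.py | busy_cities
-- ===== SOURCE A (Python) =====
-- def busy_cities(scores_dataset):
--     cities = group_by_city(scores_dataset)
--     L = []
--     max_student = 0
--     for city in cities:
--         if len(cities[city]) > max_student:
--             max_student = len(cities[city])
--             L = [city]
--         elif len(cities[city]) == max_student:
--             L.append(city)
--     return L
--
-- def group_by_city(scores_dataset):
--     cities = dict()
--     for student in scores_dataset:
--         city = student['City']
--         name = student['Name']
--         if city not in cities:
--             cities[city] = [ ]
--         cities[city].append(name)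
--     return cities
-- ===== SOURCE B (Python) =====
-- def busy_cities(scores_dataset):
--     cities = [student['City'] for student in scores_dataset]
--     firsts = list(dict.fromkeys(cities))
--     if not firsts:
--         return []
--     m = max(cities.count(c) for c in firsts)
--     return [c for c in firsts if cities.count(c) == m]
-- ===== Notes on version B (the rewrite author's own statement) =====
-- stated objective: alternative
-- what changed: B uses no dict at all: it extracts the flat list of cities, dedups it to first-occurrence order, counts each distinct city by rescanning the list with list.count, and returns the cities whose count equals the maximum (max-then-filter), instead of A's grouping dict with per-city name lists plus a running-max loop with reset/append tie logic.
import Mathlib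
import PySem

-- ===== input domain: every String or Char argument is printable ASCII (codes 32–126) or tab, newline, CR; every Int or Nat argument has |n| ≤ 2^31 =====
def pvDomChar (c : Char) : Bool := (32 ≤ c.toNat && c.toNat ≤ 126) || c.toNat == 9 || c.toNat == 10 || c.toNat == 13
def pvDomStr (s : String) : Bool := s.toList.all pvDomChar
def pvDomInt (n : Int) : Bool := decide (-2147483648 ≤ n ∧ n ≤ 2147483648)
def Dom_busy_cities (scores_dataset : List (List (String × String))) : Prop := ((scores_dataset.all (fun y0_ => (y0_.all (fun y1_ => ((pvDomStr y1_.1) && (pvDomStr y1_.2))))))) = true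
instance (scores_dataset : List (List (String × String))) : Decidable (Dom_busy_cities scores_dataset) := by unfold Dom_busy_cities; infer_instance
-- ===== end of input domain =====

-- B drops A's grouping dict and running-max loop entirely: it dedups the city list to
-- first-occurrence order and counts each city by scanning the list with list.count,
-- then returns the cities whose count equals the maximum (objective: alternative).

-- ===== PORT A =====
-- students are Python dicts ported as assoc lists; student['City'] is a first-match lookup.
-- The `.getD ""` is only for totality: Pre_busy_cities excludes the KeyError (missing key) inputs.
def pyGroupByCity (scores_dataset : List (List (String × String))) :
    PySem.Dict String (List String) :=
  scores_dataset.foldl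
    (fun cities student =>
      let city := (List.lookup "City" student).getD ""
      let name := (List.lookup "Name" student).getD ""
      let cities := if cities.contains city then cities else cities.insert city []
      cities.modify city [] (fun l => l ++ [name]))
    PySem.Dict.empty

def busy_cities (scores_dataset : List (List (String × String))) : List String :=
  let cities := pyGroupByCity scores_dataset
  (cities.keys.foldl
    (fun (st : List String × Int) city =>
      if ((cities.getD city []).length : Int) > st.2 then
        ([city], ((cities.getD city []).length : Int))
      else if ((cities.getD city []).length : Int) == st.2 then
        (st.1 ++ [city], st.2)
      else st)
    ([], 0)).1

-- ===== PORT B =====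
-- list(dict.fromkeys(cities)) is PySem.List.dedup; max(gen) is PySem.List.max? with identity key
-- (the 'none' branch is exactly B's 'if not firsts: return []' guard: max? is none iff firsts = []).
def busy_cities_alt (scores_dataset : List (List (String × String))) : List String :=
  let cities := scores_dataset.map (fun student => (List.lookup "City" student).getD "")
  let firsts := PySem.List.dedup cities
  match PySem.List.max? (firsts.map (fun c => (cities.count c : Int))) (fun v => v) with
  | none => []
  | some m => firsts.filter (fun c => (cities.count c : Int) == m)

-- ===== PRECONDITION & SPEC =====
-- Pre_ excludes exactly the inputs on which A raises KeyError: a student without a 'City' or 'Name' key.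
def Pre_busy_cities (scores_dataset : List (List (String × String))) : Prop :=
  (scores_dataset.all (fun s =>
    (List.lookup "City" s).isSome && (List.lookup "Name" s).isSome)) = true
instance (scores_dataset : List (List (String × String))) : Decidable (Pre_busy_cities scores_dataset) := by unfold Pre_busy_cities; infer_instance

def pvWitness_busy_cities : (List (List (String × String))) :=
  [[("Name", "ann"), ("City", "x")], [("Name", "bob"), ("City", "y")], [("Name", "cet"), ("City", "x")]]

def Spec_busy_cities (scores_dataset : List (List (String × String))) (out : List String) : Prop := out = busy_cities_alt scores_dataset
instance (scores_dataset : List (List (String × String))) (out : List String) : Decidable (Spec_busy_cities scores_dataset out) := by unfold Spec_busy_cities; infer_instance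

-- ===== CLAIM (what is proved, stated in full; the proofs are below) =====
def Claim_equal_busy_cities : Prop := ∀ (scores_dataset : List (List (String × String))), Dom_busy_cities scores_dataset → Pre_busy_cities scores_dataset → Spec_busy_cities scores_dataset (busy_cities scores_dataset)
-- ===== LEMMAS AND PROOFS =====

def pvKey (s : List (String × String)) : String := (List.lookup "City" s).getD ""
def pvName (s : List (String × String)) : String := (List.lookup "Name" s).getD ""

-- A's step (membership test + insert [] + append) IS one modify
lemma stepA_eq_modify (d : PySem.Dict String (List String)) (s : List (String × String)) :
    (let city := (List.lookup "City" s).getD ""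
     let name := (List.lookup "Name" s).getD ""
     let d' := if d.contains city then d else d.insert city []
     d'.modify city [] (fun l => l ++ [name])) =
    d.modify (pvKey s) [] (fun l => l ++ [pvName s]) := by
  by_cases h : d.contains ((List.lookup "City" s).getD "")
  · simp [pvKey, pvName, h]
  · simp only [pvKey, pvName, h, Bool.false_eq_true, if_false, PySem.Dict.modify,
      PySem.Dict.getD_insert_self, PySem.Dict.insert_insert_self,
      PySem.Dict.getD_of_not_contains d _ (by simpa using h)]

lemma groupByCity_eq (ds : List (List (String × String))) :
    pyGroupByCity ds =
    ds.foldl (fun d s => d.modify (pvKey s) [] (fun l => l ++ [pvName s])) PySem.Dict.empty := by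
  unfold pyGroupByCity
  congr 1
  funext d s
  exact stepA_eq_modify d s

-- the running-max loop of A over labelled counts
def pvStep (st : List String × Int) (p : String × Int) : List String × Int :=
  if p.2 > st.2 then ([p.1], p.2)
  else if p.2 == st.2 then (st.1 ++ [p.1], st.2)
  else st

def pvMx (m : Int) (L : List (String × Int)) : Int := L.foldl (fun a p => max a p.2) m

lemma pvMx_of_le {L : List (String × Int)} {m : Int} (h : ∀ p ∈ L, p.2 ≤ m) : pvMx m L = m := by
  induction L with
  | nil => rfl
  | cons p rest ih =>
    have hp : p.2 ≤ m := h p (by simp)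
    have : max m p.2 = m := by omega
    simp only [pvMx, List.foldl_cons, this]
    exact ih (fun q hq => h q (by simp [hq]))

lemma mem_le_pvMx {L : List (String × Int)} {p : String × Int} (hp : p ∈ L) (m : Int) :
    p.2 ≤ pvMx m L :=
  (PySem.List.le_foldl_max_int L (fun p => p.2) m).2 p hp

lemma loop_all_le (L : List (String × Int)) (acc : List String) (m : Int)
    (h : ∀ p ∈ L, p.2 ≤ m) :
    L.foldl pvStep (acc, m) = (acc ++ (L.filter (fun p => p.2 == m)).map (·.1), m) := by
  induction L generalizing acc with
  | nil => simp
  | cons p rest ih =>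
    have hp : p.2 ≤ m := h p (by simp)
    have hrest : ∀ q ∈ rest, q.2 ≤ m := fun q hq => h q (by simp [hq])
    have hstep : pvStep (acc, m) p = ((if p.2 = m then acc ++ [p.1] else acc), m) := by
      unfold pvStep
      rw [if_neg (by omega : ¬ p.2 > m)]
      by_cases he : p.2 = m
      · simp [he]
      · simp [he]
    rw [List.foldl_cons, hstep]
    by_cases he : p.2 = m
    · rw [if_pos he, ih _ hrest]
      simp [he]
    · rw [if_neg he, ih _ hrest]
      simp [he]  -- the filter drops p here

lemma loop_exists_gt (L : List (String × Int)) (acc : List String) (m : Int)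
    (h : ∃ p ∈ L, m < p.2) :
    L.foldl pvStep (acc, m) =
      ((L.filter (fun p => p.2 == pvMx m L)).map (·.1), pvMx m L) := by
  induction L generalizing acc m with
  | nil => simp at h
  | cons p rest ih =>
    by_cases hpm : m < p.2
    · have hstep : pvStep (acc, m) p = ([p.1], p.2) := by
        unfold pvStep
        rw [if_pos (by omega : p.2 > m)]
      have hmx : pvMx m (p :: rest) = pvMx p.2 rest := by
        simp [pvMx, (by omega : max m p.2 = p.2)]
      rw [List.foldl_cons, hstep, hmx]
      by_cases hr : ∃ q ∈ rest, p.2 < q.2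
      · rw [ih [p.1] p.2 hr]
        have hne : ¬ (p.2 = pvMx p.2 rest) := by
          obtain ⟨q, hq, hlt⟩ := hr
          have := mem_le_pvMx hq p.2
          omega
        simp [hne]
      · have hr' : ∀ q ∈ rest, q.2 ≤ p.2 := by
          intro q hq
          by_contra hlt
          exact hr ⟨q, hq, by omega⟩
        rw [loop_all_le rest [p.1] p.2 hr', pvMx_of_le hr']
        simp
    · have hp2 : p.2 ≤ m := by omega
      have hmx : pvMx m (p :: rest) = pvMx m rest := by
        simp [pvMx, (by omega : max m p.2 = m)]
      have hr : ∃ q ∈ rest, m < q.2 := by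
        obtain ⟨q, hq, hlt⟩ := h
        rcases List.mem_cons.mp hq with rfl | hq'
        · omega
        · exact ⟨q, hq', hlt⟩
      have hne : ¬ (p.2 = pvMx m rest) := by
        obtain ⟨q, hq, hlt⟩ := hr
        have := mem_le_pvMx hq m
        omega
      have hstep : pvStep (acc, m) p = ((if p.2 = m then acc ++ [p.1] else acc), m) := by
        unfold pvStep
        rw [if_neg (by omega : ¬ p.2 > m)]
        by_cases he : p.2 = m
        · simp [he]
        · simp [he]
      rw [List.foldl_cons, hstep, hmx]
      by_cases he : p.2 = m
      · rw [if_pos he, ih (acc ++ [p.1]) m hr]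
        simp [hne]
      · rw [if_neg he, ih acc m hr]
        simp [hne]

lemma getD_group (ds : List (List (String × String))) (c : String) :
    ((pyGroupByCity ds).getD c []).length = (ds.map pvKey).count c := by
  rw [groupByCity_eq]
  have : ds.foldl (fun d s => d.modify (pvKey s) [] (fun l => l ++ [pvName s])) PySem.Dict.empty
      = (ds.map (fun s => (pvKey s, pvName s))).foldl
          (fun d p => d.modify p.1 [] (fun l => l ++ [p.2])) PySem.Dict.empty := by
    rw [List.foldl_map]
  rw [this, PySem.Dict.getD_foldl_modify_append]
  simp only [PySem.Dict.getD_empty, List.nil_append, List.length_map,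
    ← List.countP_eq_length_filter, List.countP_map, List.count_eq_countP, Function.comp_def]

lemma keys_group (ds : List (List (String × String))) :
    (pyGroupByCity ds).keys = PySem.Set.ofList (ds.map pvKey) := by
  rw [groupByCity_eq]
  rw [PySem.Dict.keys_foldl_modify_key ds pvKey [] (fun _ s l => l ++ [pvName s])]
  simp [PySem.Dict.keys_empty, PySem.Set.update_nil_left]

-- ===== VERDICT (by name: the statement is the Claim_ definition above) =====
theorem busy_cities_spec : Claim_equal_busy_cities := by
  intro ds _ _
  unfold Spec_busy_cities busy_cities busy_cities_alt
  dsimp only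
  set xs := ds.map pvKey with hxs
  have hxs' : ds.map (fun s => (List.lookup "City" s).getD "") = xs := rfl
  rw [hxs', PySem.List.dedup_eq_ofList]
  set S := PySem.Set.ofList xs with hS
  set L : List (String × Int) := S.map (fun k => (k, (xs.count k : Int))) with hL
  -- A's loop over the keys is the labelled-count loop over L
  have hloopA :
      (((pyGroupByCity ds).keys).foldl
        (fun (st : List String × Int) city =>
          if (((pyGroupByCity ds).getD city []).length : Int) > st.2 then
            ([city], (((pyGroupByCity ds).getD city []).length : Int))
          else if (((pyGroupByCity ds).getD city []).length : Int) == st.2 then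
            (st.1 ++ [city], st.2)
          else st)
        ([], 0)) = L.foldl pvStep ([], 0) := by
    rw [keys_group, hL, List.foldl_map]
    apply PySem.List.foldl_congr_mem
    intro st c _
    simp [pvStep, getD_group, hxs]
  rw [hloopA]
  have hmapL : S.map (fun c => (xs.count c : Int)) = L.map (·.2) := by
    simp [hL, List.map_map, Function.comp_def]
  by_cases hxe : S = []
  · rw [hxe] at hL
    simp [hL, hxe, PySem.List.max?]
  · obtain ⟨p, rest, hLc⟩ : ∃ p rest, L = p :: rest := by
      cases hLL : L with
      | nil =>
        rw [hL] at hLL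
        exact absurd (List.map_eq_nil_iff.mp hLL) hxe
      | cons a b => exact ⟨a, b, rfl⟩
    have hpos : ∀ q ∈ L, 1 ≤ q.2 := by
      intro q hq
      rw [hL] at hq
      obtain ⟨k, hk, rfl⟩ := List.mem_map.mp hq
      have hkxs : k ∈ xs := (PySem.Set.mem_ofList _ _).mp hk
      have := List.count_pos_iff.mpr hkxs
      omega
    have hgt : ∃ q ∈ L, (0 : Int) < q.2 :=
      ⟨p, by rw [hLc]; simp, by have := hpos p (by rw [hLc]; simp); omega⟩
    rw [loop_exists_gt L [] 0 hgt, hmapL, hLc]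
    simp only [List.map_cons, PySem.List.max?_id_cons]
    have hm : pvMx 0 (p :: rest) = List.foldl max p.2 (List.map (fun x => x.2) rest) := by
      have h1 : (1 : Int) ≤ p.2 := hpos p (by rw [hLc]; simp)
      simp [pvMx, (by omega : max 0 p.2 = p.2), List.foldl_map]
    rw [← hm, ← hLc]
    -- B's filter over S equals A's filter over L projected to keys
    rw [hL, List.filter_map, List.map_map]
    simp [Function.comp_def]
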